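-- pv_equiv track=rewrite | github.com/malikinss/PyGen | PyGen for Advanced/4_nested_lists/4_5_matrices_part_2/4_5_2_find_max_element_indices/4_5_2_find_max_element_indices.py | find_max_element_indices
-- ===== SOURCE A (Python) =====
-- def find_max_element_indices(
--     n: int, m: int, matrix: list[list[int]]
-- ) -> tuple[int, int]:
--     """
--     Finds the indices (row and column) of the first occurrence of the maximum
--     element in a matrix.
--
--     Args:
--         n (int): Number of rows in the matrix.
--         m (int): Number of columns in the matrix.
--         matrix (list[list[int]]): The matrix of integers.
--
--     Returns:
--         tuple[int, int]: Indices (row, column) of the first occurrence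
--         of the maximum element.
--     """
--     row, col = 0, 0
--     for i in range(n):
--         for j in range(m):
--             if matrix[i][j] > matrix[row][col]:
--                 row, col = i, j
--     return row, col
-- ===== SOURCE B (Python) =====
-- def find_max_element_indices(
--     n: int, m: int, matrix: list[list[int]]
-- ) -> tuple[int, int]:
--     """Two passes: first find the maximum value, then the first cell holding it."""
--     if n <= 0 or m <= 0:
--         return 0, 0
--     best = matrix[0][0]
--     for i in range(n):
--         for j in range(m):
--             if matrix[i][j] > best:
--                 best = matrix[i][j]
--     for i in range(n):
--         for j in range(m):
--             if matrix[i][j] == best: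
--                 return i, j
--     return 0, 0  # unreachable: best occurs in the scanned cells
-- ===== Notes on version B (the rewrite author's own statement) =====
-- stated objective: alternative
-- what changed: Replaces A's single running-argmax state (row,col updated on every strict improvement) with two independent passes: one computing the maximum value, one returning the first row-major cell equal to it.
import Mathlib
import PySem

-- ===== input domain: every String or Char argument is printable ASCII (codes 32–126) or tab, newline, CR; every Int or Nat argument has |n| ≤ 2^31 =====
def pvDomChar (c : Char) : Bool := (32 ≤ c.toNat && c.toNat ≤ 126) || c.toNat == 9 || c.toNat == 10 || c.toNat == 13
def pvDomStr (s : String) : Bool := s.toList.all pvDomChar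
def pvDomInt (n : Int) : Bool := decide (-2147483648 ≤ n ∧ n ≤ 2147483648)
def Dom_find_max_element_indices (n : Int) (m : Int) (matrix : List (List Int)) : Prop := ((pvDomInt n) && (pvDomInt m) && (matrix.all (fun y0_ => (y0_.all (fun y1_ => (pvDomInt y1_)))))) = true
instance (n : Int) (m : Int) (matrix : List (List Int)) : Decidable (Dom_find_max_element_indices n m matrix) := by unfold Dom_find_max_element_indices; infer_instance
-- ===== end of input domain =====

-- B replaces A's running argmax by two passes (max value, then first matching cell); same cost, different decomposition.

-- matrix[i][j]; total with default 0 — Pre_ keeps every access in range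
def pvGet2 (matrix : List (List Int)) (i j : Int) : Int :=
  (PySem.List.pyGet? ((PySem.List.pyGet? matrix i).getD []) j).getD 0

-- ===== PORT A =====
def find_max_element_indices (n : Int) (m : Int) (matrix : List (List Int)) : Int × Int :=
  (PySem.List.pyRange 0 n 1).foldl
    (fun rc i => (PySem.List.pyRange 0 m 1).foldl
      (fun rc j => if pvGet2 matrix i j > pvGet2 matrix rc.1 rc.2 then (i, j) else rc) rc)
    (0, 0)

-- ===== PORT B =====
def find_max_element_indices_alt (n : Int) (m : Int) (matrix : List (List Int)) : Int × Int :=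
  if n ≤ 0 ∨ m ≤ 0 then (0, 0)
  else
    let best := (PySem.List.pyRange 0 n 1).foldl
      (fun b i => (PySem.List.pyRange 0 m 1).foldl
        (fun b j => if pvGet2 matrix i j > b then pvGet2 matrix i j else b) b)
      (pvGet2 matrix 0 0)
    -- the second nested loop with its early return = first cell (row-major) holding best;
    -- the .getD (0,0) default is Source B's unreachable final return
    (((PySem.List.pyRange 0 n 1).flatMap (fun i =>
        (PySem.List.pyRange 0 m 1).map (fun j => ((i : Int), (j : Int))))).find?
      (fun p => pvGet2 matrix p.1 p.2 == best)).getD (0, 0)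

-- ===== PRECONDITION & SPEC =====
-- Pre_ = exactly the inputs where A returns: either the loops never run (n ≤ 0 or m ≤ 0),
-- or every access matrix[i][j], i < n, j < m, is in range (else Python raises IndexError).
def Pre_find_max_element_indices (n : Int) (m : Int) (matrix : List (List Int)) : Prop :=
  n ≤ 0 ∨ m ≤ 0 ∨ (n.toNat ≤ matrix.length ∧ ∀ r ∈ matrix.take n.toNat, m.toNat ≤ r.length)
instance (n : Int) (m : Int) (matrix : List (List Int)) : Decidable (Pre_find_max_element_indices n m matrix) := by unfold Pre_find_max_element_indices; infer_instance
def pvWitness_find_max_element_indices : Int × Int × List (List Int) := (2, 2, [[1, 4], [4, 2]])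

def Spec_find_max_element_indices (n : Int) (m : Int) (matrix : List (List Int)) (out : Int × Int) : Prop := out = find_max_element_indices_alt n m matrix
instance (n : Int) (m : Int) (matrix : List (List Int)) (out : Int × Int) : Decidable (Spec_find_max_element_indices n m matrix out) := by unfold Spec_find_max_element_indices; infer_instance

-- ===== CLAIM (what is proved, stated in full; the proofs are below) =====
def Claim_equal_find_max_element_indices : Prop := ∀ (n : Int) (m : Int) (matrix : List (List Int)), Dom_find_max_element_indices n m matrix → Pre_find_max_element_indices n m matrix → Spec_find_max_element_indices n m matrix (find_max_element_indices n m matrix)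

-- ===== LEMMAS AND PROOFS =====

-- running max as a fold (exactly the fold shape of both ports' max updates)
def pvMaxFrom (a : Int) (l : List Int) : Int := l.foldl (fun b v => if v > b then v else b) a

theorem le_pvMaxFrom : ∀ (l : List Int) (a : Int), a ≤ pvMaxFrom a l := by
  intro l
  induction l with
  | nil => intro a; simp [pvMaxFrom]
  | cons x l ih =>
    intro a
    simp only [pvMaxFrom, List.foldl_cons] at *
    by_cases hx : x > a
    · rw [if_pos hx]; exact le_trans (le_of_lt hx) (ih x)
    · rw [if_neg hx]; exact ih a

theorem pvMaxFrom_eq_or_mem : ∀ (l : List Int) (a : Int), pvMaxFrom a l = a ∨ pvMaxFrom a l ∈ l := by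
  intro l
  induction l with
  | nil => intro a; simp [pvMaxFrom]
  | cons x l ih =>
    intro a
    simp only [pvMaxFrom, List.foldl_cons] at *
    by_cases hx : x > a
    · rw [if_pos hx]
      rcases ih x with h | h
      · right; rw [h]; exact List.mem_cons_self
      · right; exact List.mem_cons_of_mem _ h
    · rw [if_neg hx]
      rcases ih a with h | h
      · left; exact h
      · right; exact List.mem_cons_of_mem _ h

-- a running argmax fold returns the first element attaining the maximum (if it beats the seed)
theorem run_argmax (f : Int × Int → Int) :
    ∀ (ps : List (Int × Int)) (s : Int × Int),
      ps.foldl (fun s p => if f p > f s then p else s) s =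
        if pvMaxFrom (f s) (ps.map f) > f s
        then (ps.find? (fun p => f p == pvMaxFrom (f s) (ps.map f))).getD s
        else s := by
  intro ps
  induction ps with
  | nil => intro s; simp [pvMaxFrom]
  | cons p ps ih =>
    intro s
    simp only [List.foldl_cons, List.map_cons]
    have hM : pvMaxFrom (f s) (f p :: ps.map f) = pvMaxFrom (if f p > f s then f p else f s) (ps.map f) := rfl
    rw [hM]
    by_cases hp : f p > f s
    · simp only [if_pos hp]
      rw [ih p]
      set M := pvMaxFrom (f p) (ps.map f) with hMdef
      have hle : f p ≤ M := le_pvMaxFrom _ _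
      have hMs : M > f s := lt_of_lt_of_le hp hle
      rw [if_pos hMs]
      by_cases hpM : f p = M
      · have : ¬ (M > f p) := by omega
        rw [if_neg this, List.find?_cons_of_pos (by simp [hpM]), Option.getD_some]
      · have hlt : M > f p := lt_of_le_of_ne hle hpM
        rw [if_pos hlt, List.find?_cons_of_neg (by simp [hpM])]
        rcases pvMaxFrom_eq_or_mem (ps.map f) (f p) with h | h
        · exact absurd h.symm hpM
        · rcases List.mem_map.mp h with ⟨q, hq, hfq⟩
          have : (ps.find? (fun p => f p == M)).isSome := by
            rw [List.find?_isSome]; exact ⟨q, hq, by simp [hfq, ← hMdef]⟩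
          rcases Option.isSome_iff_exists.mp this with ⟨r, hr⟩
          rw [hr]; rfl
    · simp only [if_neg hp]
      rw [ih s]
      set M := pvMaxFrom (f s) (ps.map f) with hMdef
      by_cases hMs : M > f s
      · rw [if_pos hMs, if_pos hMs]
        have hpM : ¬ (f p = M) := by omega
        rw [List.find?_cons_of_neg (by simp [hpM])]
      · rw [if_neg hMs, if_neg hMs]

-- A's nested folds over the row-major cell list
theorem A_eq_fold (n m : Int) (matrix : List (List Int)) :
    find_max_element_indices n m matrix =
      ((PySem.List.pyRange 0 n 1).flatMap (fun i =>
          (PySem.List.pyRange 0 m 1).map (fun j => ((i : Int), (j : Int))))).foldl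
        (fun s p => if pvGet2 matrix p.1 p.2 > pvGet2 matrix s.1 s.2 then p else s) (0, 0) := by
  rw [List.foldl_flatMap]
  simp [find_max_element_indices, List.foldl_map]

-- B's max pass over the same cell list
theorem best_eq_fold (n m : Int) (matrix : List (List Int)) :
    (PySem.List.pyRange 0 n 1).foldl
      (fun b i => (PySem.List.pyRange 0 m 1).foldl
        (fun b j => if pvGet2 matrix i j > b then pvGet2 matrix i j else b) b)
      (pvGet2 matrix 0 0) =
    pvMaxFrom (pvGet2 matrix 0 0)
      (((PySem.List.pyRange 0 n 1).flatMap (fun i =>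
          (PySem.List.pyRange 0 m 1).map (fun j => ((i : Int), (j : Int))))).map
        (fun p => pvGet2 matrix p.1 p.2)) := by
  rw [pvMaxFrom, List.map_flatMap, List.foldl_flatMap]
  simp [List.foldl_map]

theorem pyRange_empty_of_nonpos (n : Int) (h : n ≤ 0) : PySem.List.pyRange 0 n 1 = [] := by
  simp [PySem.List.pyRange]; omega

-- ===== VERDICT (by name: the statement is the Claim_ definition above) =====
theorem find_max_element_indices_spec : Claim_equal_find_max_element_indices := by
  intro n m matrix _ _
  show find_max_element_indices n m matrix = find_max_element_indices_alt n m matrix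
  by_cases h : n ≤ 0 ∨ m ≤ 0
  · rw [find_max_element_indices_alt, if_pos h]
    rcases h with h | h
    · simp [find_max_element_indices, pyRange_empty_of_nonpos n h]
    · simp [find_max_element_indices, pyRange_empty_of_nonpos m h, List.foldl_fixed]
  · rw [not_or] at h
    simp only [not_le] at h
    obtain ⟨hn, hm⟩ := h
    rw [find_max_element_indices_alt, if_neg (by omega)]
    set f : Int × Int → Int := fun p => pvGet2 matrix p.1 p.2 with hf
    set P := (PySem.List.pyRange 0 n 1).flatMap (fun i =>
        (PySem.List.pyRange 0 m 1).map (fun j => ((i : Int), (j : Int)))) with hP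
    rw [A_eq_fold, run_argmax f P (0, 0), best_eq_fold]
    set M := pvMaxFrom (pvGet2 matrix 0 0) (P.map f) with hM
    have hf00 : f (0, 0) = pvGet2 matrix 0 0 := rfl
    by_cases hMs : M > pvGet2 matrix 0 0
    · rw [if_pos (by rw [hf00]; exact hMs)]
    · rw [if_neg (by rw [hf00]; exact hMs)]
      have hMeq : M = pvGet2 matrix 0 0 := le_antisymm (by omega) (le_pvMaxFrom _ _)
      have hPcons : ∃ rest, P = ((0 : Int), (0 : Int)) :: rest := by
        rw [hP, PySem.List.pyRange_one_cons (by omega : (0:Int) < n), List.flatMap_cons,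
            PySem.List.pyRange_one_cons (by omega : (0:Int) < m), List.map_cons]
        exact ⟨_, rfl⟩
      obtain ⟨rest, hrest⟩ := hPcons
      rw [hrest]
      show (0, 0) = (List.find? (fun p => pvGet2 matrix p.1 p.2 == M) (((0:Int), (0:Int)) :: rest)).getD (0, 0)
      rw [List.find?_cons_of_pos (by simp [hMeq]), Option.getD_some]
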